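-- pv_equiv track=rewrite | github.com/ooMia/BOJ | 프로그래머스/1/135808. 과일 장수/과일 장수.py | solution
-- ===== SOURCE A (Python) =====
-- def solution(k, m, score):
--     if len(score) < m:
--         return 0
--     answer = 0
--     score = sorted(score, reverse=True)
--     for i in range(len(score) // m):
--         arr = score[i*m : i*m+m]
--         answer += arr[-1] * m
--     return answer
-- ===== SOURCE B (Python) =====
-- def solution(k, m, score):
--     # Frequency-map algorithm: no sort of the n elements. Count each score once,
--     # walk the distinct scores from high to low, and for the run each value would
--     # occupy in the descending order use arithmetic (floor divisions) to count how
--     # many box-minimum positions (positions = m-1 mod m, within the first boxes*m)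
--     # fall inside that run.
--     if m <= 0 or len(score) < m:
--         return 0
--     cnt = {}
--     for v in score:
--         cnt[v] = cnt.get(v, 0) + 1
--     boxes = len(score) // m
--     total = 0
--     seen = 0
--     for v in sorted(cnt, reverse=True):
--         c = cnt[v]
--         picks = min((seen + c) // m, boxes) - min(seen // m, boxes)
--         total += v * picks * m
--         seen += c
--     return total
-- ===== Notes on version B (the rewrite author's own statement) =====
-- stated objective: alternative
-- what changed: B never sorts the n scores: it builds a frequency map, walks only the distinct scores from high to low, and uses floor-division arithmetic on cumulative counts to count how many box-minimum positions fall in each value's run, replacing A's full descending sort plus per-box slicing loop; Pre_ excludes m = 0, where A raises ZeroDivisionError and B returns 0.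
import Mathlib
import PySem

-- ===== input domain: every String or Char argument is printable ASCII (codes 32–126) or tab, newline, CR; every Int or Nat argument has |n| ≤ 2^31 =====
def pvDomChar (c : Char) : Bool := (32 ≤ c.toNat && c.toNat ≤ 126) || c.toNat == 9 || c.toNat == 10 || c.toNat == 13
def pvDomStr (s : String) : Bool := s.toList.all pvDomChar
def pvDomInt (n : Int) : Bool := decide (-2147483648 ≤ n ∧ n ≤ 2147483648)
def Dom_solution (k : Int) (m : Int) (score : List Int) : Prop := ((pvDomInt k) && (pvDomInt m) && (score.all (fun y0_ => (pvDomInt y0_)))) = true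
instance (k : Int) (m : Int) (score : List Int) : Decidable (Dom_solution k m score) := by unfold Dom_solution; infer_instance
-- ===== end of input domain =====

-- B replaces A's full descending sort + per-box slicing loop by a frequency map over the
-- distinct scores: it walks the distinct values from high to low and counts by floor-division
-- arithmetic how many box-minimum positions fall inside each value's run; objective: alternative.

-- ===== PORT A =====
-- arr[-1] is pyGet?; it is some on every input Pre_ admits (each block is nonempty), .getD 0 marks the unreachable IndexError
def solution (k : Int) (m : Int) (score : List Int) : Int :=
  if (score.length : Int) < m then 0
  else
    let s := PySem.List.sorted score (fun x => x) true
    (PySem.List.pyRange 0 (PySem.Int.floordiv (s.length : Int) m) 1).foldl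
      (fun answer i =>
        let arr := PySem.List.slice s (some (i * m)) (some (i * m + m))
        answer + ((PySem.List.pyGet? arr (-1)).getD 0) * m) 0

-- ===== PORT B =====
def solution_alt (k : Int) (m : Int) (score : List Int) : Int :=
  if m ≤ 0 ∨ (score.length : Int) < m then 0
  else
    let cnt := score.foldl (fun d v => d.insert v (d.getD v 0 + 1)) PySem.Dict.empty
    let boxes := PySem.Int.floordiv (score.length : Int) m
    let res := (PySem.List.sorted cnt.keys (fun x => x) true).foldl
      (fun (st : Int × Int) v =>
        let c := cnt.getD v 0
        let picks := min (PySem.Int.floordiv (st.2 + c) m) boxes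
                     - min (PySem.Int.floordiv st.2 m) boxes
        (st.1 + v * picks * m, st.2 + c)) (0, 0)
    res.1

-- ===== PRECONDITION & SPEC =====
-- Pre_ excludes exactly m = 0, where A raises ZeroDivisionError (range(len(score)//m))
def Pre_solution (k : Int) (m : Int) (score : List Int) : Prop := m ≠ 0
instance (k : Int) (m : Int) (score : List Int) : Decidable (Pre_solution k m score) := by unfold Pre_solution; infer_instance
def pvWitness_solution : Int × Int × List Int := (4, 2, [1, 2, 3, 1])

def Spec_solution (k : Int) (m : Int) (score : List Int) (out : Int) : Prop := out = solution_alt k m score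
instance (k : Int) (m : Int) (score : List Int) (out : Int) : Decidable (Spec_solution k m score out) := by unfold Spec_solution; infer_instance

-- ===== CLAIM (what is proved, stated in full; the proofs are below) =====
def Claim_equal_solution : Prop := ∀ (k : Int) (m : Int) (score : List Int), Dom_solution k m score → Pre_solution k m score → Spec_solution k m score (solution k m score)

-- ===== LEMMAS AND PROOFS =====

-- getD-level index lemmas used to read one element out of A's take/drop chain
theorem pv_getD_take (xs : List Int) (n i : Nat) (h : i < n) :
    (xs.take n).getD i 0 = xs.getD i 0 := by
  simp [List.getD_eq_getElem?_getD, List.getElem?_take_of_lt h]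

theorem pv_getD_drop (xs : List Int) (j i : Nat) :
    (xs.drop j).getD i 0 = xs.getD (j + i) 0 := by
  simp [List.getD_eq_getElem?_getD, List.getElem?_drop]

theorem pv_pyGet_neg_one (xs : List Int) (h : xs ≠ []) :
    (PySem.List.pyGet? xs (-1)).getD 0 = xs.getD (xs.length - 1) 0 := by
  have hl : 1 ≤ xs.length := List.length_pos_iff.mpr h
  have h1 : xs.length - 1 < xs.length := by omega
  simp only [PySem.List.pyGet?, PySem.List.pyIdx?]
  rw [if_neg (by omega), if_pos (by omega : -(xs.length : Int) ≤ -1)]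
  simp [List.getD_eq_getElem?_getD, List.getElem?_eq_getElem h1]

-- a flatMap of replicated runs: its count function (for a Nodup run list)
theorem pv_count_repl (c : Int → Nat) :
    ∀ (ks : List Int), ks.Nodup → ∀ x : Int,
      (ks.flatMap (fun v => List.replicate (c v) v)).count x
        = if x ∈ ks then c x else 0 := by
  intro ks
  induction ks with
  | nil => intro _ x; simp
  | cons v rest ih =>
    intro hnd x
    rcases List.nodup_cons.mp hnd with ⟨hv, hnd'⟩
    rw [List.flatMap_cons, List.count_append, List.count_replicate, ih hnd' x]
    by_cases hxv : x = v
    · subst hxv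
      simp [hv]
    · simp [hxv, Ne.symm hxv]

-- a flatMap of replicated runs of a descending run list is descending
theorem pv_repl_pairwise (c : Int → Nat) :
    ∀ (ks : List Int), ks.Pairwise (fun a b => b ≤ a) →
      (ks.flatMap (fun v => List.replicate (c v) v)).Pairwise (fun a b => b ≤ a) := by
  intro ks
  induction ks with
  | nil => intro _; simp
  | cons v rest ih =>
    intro hp
    rcases List.pairwise_cons.mp hp with ⟨hhead, htail⟩
    rw [List.flatMap_cons]
    apply List.pairwise_append.mpr
    refine ⟨List.pairwise_replicate.mpr (by simp), ih htail, ?_⟩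
    intro a ha b hb
    have hav : a = v := (List.eq_of_mem_replicate ha)
    rcases List.mem_flatMap.mp hb with ⟨w, hw, hbw⟩
    have hbv : b = w := List.eq_of_mem_replicate hbw
    rw [hav, hbv]
    exact hhead w hw

-- the descending sort of score decomposes into runs of its distinct values (high to low)
theorem pv_desc_eq_flat (score : List Int) :
    PySem.List.sorted score (fun x => x) true
      = (PySem.List.sorted (PySem.Set.ofList score) (fun x => x) true).flatMap
          (fun v => List.replicate (score.count v) v) := by
  set keysD := PySem.List.sorted (PySem.Set.ofList score) (fun x => x) true with hk
  set flat := keysD.flatMap (fun v => List.replicate (score.count v) v) with hf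
  have hknd : keysD.Nodup :=
    ((PySem.List.sorted_perm _ _ _).nodup_iff).mpr (PySem.Set.nodup_ofList score)
  have hkmem : ∀ x : Int, x ∈ keysD ↔ x ∈ score := by
    intro x
    rw [hk, PySem.List.mem_sorted, PySem.Set.mem_ofList]
  have hcount : ∀ x : Int, flat.count x = score.count x := by
    intro x
    rw [hf, pv_count_repl _ keysD hknd x]
    by_cases hx : x ∈ keysD
    · rw [if_pos hx]
    · rw [if_neg hx]
      exact (List.count_eq_zero.mpr (fun h => hx ((hkmem x).mpr h))).symm
  have hperm : (PySem.List.sorted score (fun x => x) true).Perm flat :=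
    (PySem.List.sorted_perm _ _ _).trans
      ((List.perm_iff_count.mpr (fun x => (hcount x).symm)))
  apply PySem.List.eq_of_perm_of_pairwise_le_of_injective (fun x : Int => -x)
    (fun a b h => neg_injective h) hperm
  · exact (PySem.List.sorted_pairwise_rev score (fun x => x)).imp (fun h => by omega)
  · exact (pv_repl_pairwise _ keysD
      ((PySem.List.sorted_pairwise_rev _ (fun x => x)).imp (fun h => h))).imp
      (fun h => by omega)

-- B's fold over the run list, generalised: state (tot, s) with the suffix of desc from s
-- being the flattened remaining runs; result adds m * (sum of box minima at positions ≥ s)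
theorem pv_fold_runs (M : Nat) (hM : 0 < M) (desc : List Int) (c : Int → Nat) :
    ∀ (ks : List Int) (s : Nat) (tot : Int),
      desc.drop s = ks.flatMap (fun v => List.replicate (c v) v) →
      (ks.foldl
        (fun (st : Int × Int) v =>
          (st.1 + v * (min (PySem.Int.floordiv (st.2 + ((c v : Nat) : Int)) (M : Int)) ((desc.length / M : Nat) : Int)
                       - min (PySem.Int.floordiv st.2 (M : Int)) ((desc.length / M : Nat) : Int)) * (M : Int),
           st.2 + ((c v : Nat) : Int)))
        (tot, (s : Int))).1
      = tot + (M : Int) * ∑ i ∈ Finset.Ico (min (desc.length / M) (s / M)) (desc.length / M),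
            desc.getD (i * M + (M - 1)) 0 := by
  intro ks
  induction ks with
  | nil =>
    intro s tot hdrop
    have hlen : desc.length ≤ s := by
      by_contra hlt
      have : desc.drop s ≠ [] := by
        intro h0
        have := List.length_drop (l := desc) (i := s)
        rw [h0] at this; simp at this; omega
      exact this (by simpa using hdrop)
    have : min (desc.length / M) (s / M) = desc.length / M :=
      min_eq_left (Nat.div_le_div_right hlen)
    rw [this]
    simp
  | cons v rest ih =>
    intro s tot hdrop
    set n := desc.length with hn
    set q := n / M with hq
    have hflat : desc.drop s = List.replicate (c v) v ++ rest.flatMap (fun w => List.replicate (c w) w) := by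
      simpa [List.flatMap_cons] using hdrop
    have hdrop' : desc.drop (s + c v) = rest.flatMap (fun w => List.replicate (c w) w) := by
      have h1 : (desc.drop s).drop (c v) = desc.drop (s + c v) := by
        rw [List.drop_drop]
      rw [← h1, hflat]
      exact List.drop_left' (by simp)
    have hcast : (s : Int) + ((c v : Nat) : Int) = ((s + c v : Nat) : Int) := by push_cast; ring
    -- the fold step
    simp only [List.foldl_cons]
    rw [hcast]
    have hstep := ih (s + c v)
      (tot + v * (min (PySem.Int.floordiv ((s : Int) + ((c v : Nat) : Int)) (M : Int)) ((q : Nat) : Int)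
                  - min (PySem.Int.floordiv (s : Int) (M : Int)) ((q : Nat) : Int)) * (M : Int))
      hdrop'
    rw [hcast] at hstep
    rw [hstep]
    -- arithmetic of the added term
    set a := min q (s / M) with ha
    set b := min q ((s + c v) / M) with hb
    have hab : a ≤ b := by
      have : s / M ≤ (s + c v) / M := Nat.div_le_div_right (by omega)
      omega
    have hbq : b ≤ q := min_le_left _ _
    have hpicks : (min (PySem.Int.floordiv (((s + c v : Nat)) : Int) (M : Int)) ((q : Nat) : Int)
                  - min (PySem.Int.floordiv (s : Int) (M : Int)) ((q : Nat) : Int)) = ((b - a : Nat) : Int) := by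
      rw [PySem.Int.floordiv_natCast, PySem.Int.floordiv_natCast]
      rw [show ((((s + c v) / M : Nat) : Int)) ⊓ ((q : Nat) : Int) = (((((s + c v) / M)) ⊓ q : Nat) : Int) by exact_mod_cast rfl]
      rw [show (((s / M : Nat) : Int)) ⊓ ((q : Nat) : Int) = ((((s / M)) ⊓ q : Nat) : Int) by exact_mod_cast rfl]
      rw [← Nat.cast_sub (by omega : min (s / M) q ≤ min ((s + c v) / M) q)]
      congr 1
      omega
    -- every box-minimum position in [a, b) carries value v
    have hval : ∀ i ∈ Finset.Ico a b, desc.getD (i * M + (M - 1)) 0 = v := by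
      intro i hi
      rcases Finset.mem_Ico.mp hi with ⟨hia, hib⟩
      have haq : a < q := lt_of_le_of_lt hia (lt_of_lt_of_le hib hbq)
      have hasm : a = s / M := by
        rcases Nat.lt_or_ge (s / M) q with h | h
        · rw [ha, min_eq_right h.le]
        · exfalso; rw [ha, min_eq_left h] at haq; omega
      have his : s ≤ i * M + (M - 1) := by
        have h1 : s / M ≤ i := by omega
        have h2 : (s / M) * M + s % M = s := by
          rw [Nat.mul_comm]; exact Nat.div_add_mod s M
        have h3 : s % M < M := Nat.mod_lt _ hM
        have h4 : (s / M) * M ≤ i * M := Nat.mul_le_mul_right M h1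
        omega
      have hie : i * M + (M - 1) < s + c v := by
        have hb' : b ≤ (s + c v) / M := by rw [hb]; exact min_le_right _ _
        have h1 : i + 1 ≤ (s + c v) / M := by omega
        have h2 : (i + 1) * M ≤ ((s + c v) / M) * M := Nat.mul_le_mul_right M h1
        have h3 : ((s + c v) / M) * M ≤ s + c v := Nat.div_mul_le_self _ _
        have h4 : i * M + M = (i + 1) * M := by rw [Nat.succ_mul]
        omega
      have hidx : i * M + (M - 1) = s + (i * M + (M - 1) - s) := by omega
      have hlt : i * M + (M - 1) - s < c v := by omega
      rw [hidx, ← pv_getD_drop, hflat]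
      rw [List.getD_eq_getElem?_getD, List.getElem?_append_left (by simp [hlt]), List.getElem?_replicate]
      rw [if_pos hlt]
      rfl
    have hsplit : ∑ i ∈ Finset.Ico a q, desc.getD (i * M + (M - 1)) 0
        = ∑ i ∈ Finset.Ico a b, desc.getD (i * M + (M - 1)) 0
          + ∑ i ∈ Finset.Ico b q, desc.getD (i * M + (M - 1)) 0 :=
      (Finset.sum_Ico_consecutive _ hab hbq).symm
    have hconst : ∑ i ∈ Finset.Ico a b, desc.getD (i * M + (M - 1)) 0 = ((b - a : Nat) : Int) * v := by
      rw [Finset.sum_congr rfl hval, Finset.sum_const, Nat.card_Ico, nsmul_eq_mul]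
    rw [hpicks, hsplit, hconst]
    ring

-- the A-side loop evaluates to m times the sum of the block minima of the descending sort
theorem pv_A_loop (M : Nat) (hM : 0 < M) (desc : List Int) :
    (PySem.List.pyRange 0 ((desc.length / M : Nat) : Int) 1).foldl
      (fun answer i =>
        answer + ((PySem.List.pyGet? (PySem.List.slice desc (some (i * (M : Int))) (some (i * (M : Int) + (M : Int)))) (-1)).getD 0) * (M : Int)) 0
    = (M : Int) * ∑ i ∈ Finset.Ico 0 (desc.length / M), desc.getD (i * M + (M - 1)) 0 := by
  set n := desc.length with hn
  set q := n / M with hq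
  rw [PySem.List.pyRange_zero_natCast]
  rw [PySem.List.foldl_add]
  rw [zero_add, List.map_map]
  have hbody : ∀ i ∈ List.range q,
      ((fun i : Int => (PySem.List.pyGet? (PySem.List.slice desc (some (i * (M : Int))) (some (i * (M : Int) + (M : Int)))) (-1)).getD 0 * (M : Int)) ∘ (fun j : Nat => (j : Int))) i
        = desc.getD (i * M + (M - 1)) 0 * (M : Int) := by
    intro i hi
    have hiq : i < q := List.mem_range.mp hi
    have hiM : (i + 1) * M ≤ n := by
      calc (i + 1) * M ≤ q * M := Nat.mul_le_mul_right M (by omega)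
      _ ≤ n := by rw [hq]; exact Nat.div_mul_le_self _ _
    simp only [Function.comp]
    have e1 : ((i : Int) * (M : Int)) = ((i * M : Nat) : Int) := by push_cast; ring
    rw [e1, PySem.List.slice_natCast_add]
    set arr := (desc.drop (i * M)).take M with harr
    have hlarr : arr.length = M := by
      rw [harr, List.length_take, List.length_drop, ← hn]
      have hsm : (i + 1) * M = i * M + M := Nat.succ_mul i M
      omega
    have hne : arr ≠ [] := by
      intro h0; rw [h0] at hlarr; simp at hlarr; omega
    rw [pv_pyGet_neg_one arr hne, hlarr, harr]
    rw [pv_getD_take _ _ _ (by omega), pv_getD_drop]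
  rw [List.map_congr_left hbody]
  rw [Nat.Ico_zero_eq_range]
  calc ((List.range q).map (fun i => desc.getD (i * M + (M - 1)) 0 * (M : Int))).sum
      = ∑ i ∈ Finset.range q, desc.getD (i * M + (M - 1)) 0 * (M : Int) := rfl
    _ = (M : Int) * ∑ i ∈ Finset.range q, desc.getD (i * M + (M - 1)) 0 := by
        rw [Finset.mul_sum]
        exact Finset.sum_congr rfl (fun i _ => mul_comm _ _)

theorem solution_eq_alt (k m : Int) (score : List Int) (hm : m ≠ 0) :
    solution k m score = solution_alt k m score := by
  rcases lt_trichotomy m 0 with hneg | hz | hpos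
  · -- m < 0 : the range in A is empty, B's guard fires; both return 0
    have hnl : ¬ ((score.length : Int) < m) := by
      have : (0:Int) ≤ score.length := Int.natCast_nonneg _
      omega
    unfold solution solution_alt
    rw [if_neg hnl, if_pos (Or.inl hneg.le)]
    have hq : PySem.Int.floordiv (((PySem.List.sorted score (fun x => x) true).length : Int)) m ≤ 0 := by
      set n : Int := (((PySem.List.sorted score (fun x => x) true).length : Int)) with hn
      have hn0 : (0:Int) ≤ n := Int.natCast_nonneg _
      have h1 := PySem.Int.floordiv_mul_add_mod n m
      have h2 := PySem.Int.mod_neg_bounds (a := n) hneg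
      nlinarith [h1, h2.1, h2.2]
    have hempty : PySem.List.pyRange 0 (PySem.Int.floordiv (((PySem.List.sorted score (fun x => x) true).length : Int)) m) 1 = [] := by
      rw [PySem.List.pyRange_of_pos _ _ (by norm_num : (0:Int) < 1), if_neg (by omega)]
      simp
    simp only [hempty, List.foldl_nil]
  · exact absurd hz hm
  · by_cases hlt : (score.length : Int) < m
    · unfold solution solution_alt
      rw [if_pos hlt, if_pos (Or.inr hlt)]
    · obtain ⟨M, rfl⟩ : ∃ M : Nat, m = (M : Int) := ⟨m.toNat, (Int.toNat_of_nonneg hpos.le).symm⟩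
      have hM : 0 < M := by exact_mod_cast hpos
      unfold solution solution_alt
      rw [if_neg hlt, if_neg (by simp only [not_or, not_le, not_lt]; exact ⟨by exact_mod_cast hpos, not_lt.mp hlt⟩)]
      have hlen : (PySem.List.sorted score (fun x => x) true).length = score.length :=
        PySem.List.length_sorted _ _ _
      have hflat0 : (PySem.List.sorted score (fun x => x) true).drop 0
          = (PySem.List.sorted (PySem.Set.ofList score) (fun x => x) true).flatMap
              (fun v => List.replicate (score.count v) v) := by
        rw [List.drop_zero]
        exact pv_desc_eq_flat score
      have hA := pv_A_loop M hM (PySem.List.sorted score (fun x => x) true)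
      rw [hlen] at hA
      have hB := pv_fold_runs M hM (PySem.List.sorted score (fun x => x) true)
        (fun v => score.count v)
        (PySem.List.sorted (PySem.Set.ofList score) (fun x => x) true) 0 0 hflat0
      simp only [hlen, Nat.cast_zero, Nat.zero_div, Nat.min_zero, zero_add] at hB
      simp only [PySem.Dict.foldl_insert_getD_add_one_eq_counter, PySem.Dict.keys_counter,
        PySem.Dict.getD_counter, hlen, PySem.Int.floordiv_natCast]
      rw [hA, hB]

-- ===== VERDICT (by name: the statement is the Claim_ definition above) =====
theorem solution_spec : Claim_equal_solution := by
  intro k m score _ hpre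
  unfold Spec_solution
  exact solution_eq_alt k m score hpre
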